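-- pv_equiv track=rewrite | github.com/syiehab/picoCTF | Crypto/transposition-trial.py | swap_letters_in_blocks
-- ===== SOURCE A (Python) =====
-- def swap_letters_in_blocks(text):
--     # Ensure text length is a multiple of 3 by padding with spaces if needed
--     while len(text) % 3 != 0:
--         text += ' '
--
--     result = []
--
--     # Iterate through the string in blocks of 3 letters
--     for i in range(0, len(text), 3):
--         block = text[i:i+3]
--
--         # Swap the first and third letters
--         swapped_block = block[2] + block[0] + block[1]
--
--         # Add the swapped block to the result
--         result.append(swapped_block)
--
--     # Join the result list into a single string
--     return ''.join(result)
-- ===== SOURCE B (Python) =====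
-- def swap_letters_in_blocks(text):
--     # Pad with spaces to a multiple of 3 (same padding as the original)
--     while len(text) % 3 != 0:
--         text += ' '
--     # Three strided column streams; each block (f, s, t) is emitted as t+f+s
--     firsts = text[0::3]
--     seconds = text[1::3]
--     thirds = text[2::3]
--     return ''.join(t + f + s for f, s, t in zip(firsts, seconds, thirds))
-- ===== Notes on version B (the rewrite author's own statement) =====
-- stated objective: idiomatic
-- what changed: Replaces the block-by-block loop (consecutive slices text[i:i+3] with per-block index swapping) by three strided column slices text[0::3], text[1::3], text[2::3] zipped back together, emitting t+f+s per triple; C-level slicing/zip replaces the per-block Python-loop slicing.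
import Mathlib
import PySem

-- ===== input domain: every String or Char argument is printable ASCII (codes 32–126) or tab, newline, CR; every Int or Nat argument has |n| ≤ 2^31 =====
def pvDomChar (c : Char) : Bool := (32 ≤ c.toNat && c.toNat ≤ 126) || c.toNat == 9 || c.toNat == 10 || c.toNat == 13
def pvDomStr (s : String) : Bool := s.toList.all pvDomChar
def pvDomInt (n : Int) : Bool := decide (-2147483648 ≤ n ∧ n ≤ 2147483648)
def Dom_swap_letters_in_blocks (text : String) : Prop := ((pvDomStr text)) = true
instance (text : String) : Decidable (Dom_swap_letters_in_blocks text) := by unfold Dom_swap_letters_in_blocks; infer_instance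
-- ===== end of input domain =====

-- B replaces A's block-by-block consecutive slicing with three strided column slices
-- (text[0::3], text[1::3], text[2::3]) zipped back together; objective: idiomatic.


-- ===== PORT A =====
-- A's padding loop: while len(text) % 3 != 0: text += ' '
-- (structural with a fuel guard; fuel 3 always suffices: the loop runs at most twice)
def padSpacesA : Nat → List Char → List Char
  | 0, l => l
  | Nat.succ fuel, l => if l.length % 3 ≠ 0 then padSpacesA fuel (l ++ [' ']) else l

-- block[2]/block[0]/block[1]: every block after padding has length 3, so Python's
-- indexing never raises; pyGetD's default is unreachable.
def swap_letters_in_blocks (text : String) : String :=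
  let t := padSpacesA 3 text.toList
  let result : List (List Char) :=
    (PySem.List.pyRange 0 (t.length : Int) 3).foldl (fun acc i =>
      acc ++ [[PySem.List.pyGetD (PySem.List.slice t (some i) (some (i + 3))) 2 ' ',
               PySem.List.pyGetD (PySem.List.slice t (some i) (some (i + 3))) 0 ' ',
               PySem.List.pyGetD (PySem.List.slice t (some i) (some (i + 3))) 1 ' ']]) []
  String.ofList (PySem.Chars.join [] result)

-- ===== PORT B =====
-- B keeps A's padding loop verbatim
def padSpacesB : Nat → List Char → List Char
  | 0, l => l
  | Nat.succ fuel, l => if l.length % 3 ≠ 0 then padSpacesB fuel (l ++ [' ']) else l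

-- text[k::3] is slice? with step 3; step ≠ 0, so the .getD [] default is unreachable.
def swap_letters_in_blocks_alt (text : String) : String :=
  let t := padSpacesB 3 text.toList
  let firsts := (PySem.List.slice? t (some 0) none 3).getD []
  let seconds := (PySem.List.slice? t (some 1) none 3).getD []
  let thirds := (PySem.List.slice? t (some 2) none 3).getD []
  String.ofList (PySem.Chars.join []
    ((firsts.zip (seconds.zip thirds)).map (fun p => [p.2.2, p.1, p.2.1])))

-- ===== PRECONDITION & SPEC =====
def Spec_swap_letters_in_blocks (text : String) (out : String) : Prop := out = swap_letters_in_blocks_alt text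
instance (text : String) (out : String) : Decidable (Spec_swap_letters_in_blocks text out) := by unfold Spec_swap_letters_in_blocks; infer_instance

-- ===== CLAIM (what is proved, stated in full; the proofs are below) =====
def Claim_equal_swap_letters_in_blocks : Prop := ∀ (text : String), Dom_swap_letters_in_blocks text → Spec_swap_letters_in_blocks text (swap_letters_in_blocks text)

-- ===== LEMMAS AND PROOFS =====

theorem padSpacesB_eq (fuel : Nat) (l : List Char) : padSpacesB fuel l = padSpacesA fuel l := by
  induction fuel generalizing l with
  | zero => rfl
  | succ fuel ih => simp only [padSpacesB, padSpacesA]; split_ifs with h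
                    · exact ih _
                    · rfl

theorem padSpacesA_mod (l : List Char) : (padSpacesA 3 l).length % 3 = 0 := by
  simp only [padSpacesA, List.length_append]
  split_ifs <;> simp_all [List.length_append] <;> omega

-- proof-side spec of a step-3 stride
def stride3 : List Char → List Char
  | [] => []
  | a :: r => a :: stride3 (r.drop 2)
termination_by l => l.length
decreasing_by simp

theorem slice?_stride3 (xs : List Char) (j : Nat) :
    PySem.List.slice? xs (some (j : Int)) none 3 = some (stride3 (xs.drop j)) := by
  by_cases hj : xs.length ≤ j
  · rw [List.drop_eq_nil_of_le hj]
    simp [PySem.List.slice?, PySem.List.sliceIndices, stride3]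
    omega
  · push Not at hj
    have key := slice?_stride3 xs (j + 3)
    simp only [PySem.List.slice?, PySem.List.sliceIndices] at key ⊢
    norm_num at key ⊢
    rw [if_neg (by omega : ¬ ((↑j : ℤ) + 3 < 0))] at key
    rw [if_neg (by omega : ¬ ((↑j : ℤ) < 0)), min_eq_left (by omega : (↑j : ℤ) ≤ ↑xs.length),
        if_pos (by omega : (↑j : ℤ) < ↑xs.length)]
    have hdropj : xs.drop j = xs[j] :: xs.drop (j + 1) := List.drop_eq_getElem_cons hj
    have hstr : stride3 (xs.drop j) = xs[j] :: stride3 (xs.drop (j + 3)) := by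
      rw [hdropj, stride3, List.drop_drop]
    rw [hstr]
    have hidx0 : (((j : ℤ)) + 3 * ((0 : Nat) : ℤ)).toNat = j := by omega
    by_cases h3 : (xs.length : ℤ) ≤ ↑j + 3
    · rw [min_eq_right h3, if_neg (by omega), List.range_zero, List.filterMap_nil] at key
      rw [(by omega : (((↑xs.length : ℤ) - ↑j + 3 - 1) / 3).toNat = 1)]
      simp only [List.range_one, List.filterMap_cons, List.filterMap_nil, hidx0,
        List.getElem?_eq_getElem hj]
      rw [← key]
    · rw [min_eq_left (by omega), if_pos (by omega)] at key
      rw [(by omega : (((↑xs.length : ℤ) - ↑j + 3 - 1) / 3).toNat =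
            (((↑xs.length : ℤ) - (↑j + 3) + 3 - 1) / 3).toNat + 1),
        List.range_succ_eq_map, List.filterMap_cons, List.filterMap_map]
      simp only [hidx0, List.getElem?_eq_getElem hj]
      rw [← key]
      congr 1
      apply List.filterMap_congr
      intro a _
      simp only [Function.comp_apply]
      congr 1
      omega
termination_by xs.length - j
decreasing_by omega

theorem core (m : Nat) (t : List Char) (h : t.length = 3 * m) :
    (PySem.List.pyRange 0 (t.length : Int) 3).map (fun i =>
      [PySem.List.pyGetD (PySem.List.slice t (some i) (some (i + 3))) 2 ' ',
       PySem.List.pyGetD (PySem.List.slice t (some i) (some (i + 3))) 0 ' ',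
       PySem.List.pyGetD (PySem.List.slice t (some i) (some (i + 3))) 1 ' ']) =
    ((stride3 t).zip ((stride3 (t.drop 1)).zip (stride3 (t.drop 2)))).map
      (fun p => [p.2.2, p.1, p.2.1]) := by
  induction m generalizing t with
  | zero =>
    have : t = [] := List.eq_nil_of_length_eq_zero (by omega)
    subst this
    simp [PySem.List.pyRange, stride3]
  | succ m ih =>
    match t, h with
    | a :: b :: c :: rest, h =>
    have hrest : rest.length = 3 * m := by simp at h; omega
    have hstr : stride3 (a :: b :: c :: rest) = a :: stride3 rest := by
      rw [stride3]; rfl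
    have hstr1 : stride3 ((a :: b :: c :: rest).drop 1) = b :: stride3 (rest.drop 1) := by
      rw [List.drop_one, List.tail_cons, stride3]; rfl
    have hstr2 : stride3 ((a :: b :: c :: rest).drop 2) = c :: stride3 (rest.drop 2) := by
      rw [show (a :: b :: c :: rest).drop 2 = c :: rest from rfl, stride3]
    rw [hstr, hstr1, hstr2]
    rw [PySem.List.pyRange_of_pos 0 (((a :: b :: c :: rest).length : Nat) : Int) (by norm_num)]
    rw [if_pos (by omega), (by simp only [List.length_cons] at h ⊢; push_cast; omega :
      ((((((a :: b :: c :: rest).length : Nat) : Int)) - 0 + 3 - 1) / 3).toNat = m + 1)]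
    rw [List.range_succ_eq_map, List.map_cons, List.map_map]
    have ihr := ih rest hrest
    rw [PySem.List.pyRange_of_pos 0 ((rest.length : Nat) : Int) (by norm_num)] at ihr
    rw [(by split_ifs <;> omega :
      (if 0 < ((rest.length : Nat) : Int) then
        ((((rest.length : Nat) : Int) - 0 + 3 - 1) / 3).toNat else 0) = m)] at ihr
    rw [List.zip_cons_cons, List.zip_cons_cons, List.map_cons, List.map_cons]
    congr 1
    rw [← ihr, List.map_map, List.map_map]
    apply List.map_congr_left
    intro k _
    simp only [Function.comp_apply]
    have hsl : PySem.List.slice (a :: b :: c :: rest) (some (0 + 3 * ((k.succ : Nat) : Int)))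
        (some (0 + 3 * ((k.succ : Nat) : Int) + 3))
        = PySem.List.slice rest (some (0 + 3 * ((k : Nat) : Int))) (some (0 + 3 * ((k : Nat) : Int) + 3)) := by
      rw [PySem.List.slice_toNat (a :: b :: c :: rest)
            (a := 0 + 3 * ((k.succ : Nat) : Int)) (b := 0 + 3 * ((k.succ : Nat) : Int) + 3)
            (by omega) (by omega),
          PySem.List.slice_toNat rest
            (a := 0 + 3 * ((k : Nat) : Int)) (b := 0 + 3 * ((k : Nat) : Int) + 3)
            (by omega) (by omega)]
      rw [(by omega : (0 + 3 * ((k.succ : Nat) : Int)).toNat = 3 * k + 3),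
          (by omega : (0 + 3 * ((k.succ : Nat) : Int) + 3).toNat = 3 * k + 3 + 3),
          (by omega : (0 + 3 * ((k : Nat) : Int)).toNat = 3 * k),
          (by omega : (0 + 3 * ((k : Nat) : Int) + 3).toNat = 3 * k + 3)]
      rw [(by omega : 3 * k + 3 = 3 + 3 * k), ← List.drop_drop,
          (by rfl : List.drop 3 (a :: b :: c :: rest) = rest)]
      congr 1
      omega
    rw [hsl]

-- ===== VERDICT (by name: the statement is the Claim_ definition above) =====
theorem swap_letters_in_blocks_spec : Claim_equal_swap_letters_in_blocks := by
  intro text _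
  unfold Spec_swap_letters_in_blocks swap_letters_in_blocks swap_letters_in_blocks_alt
  rw [padSpacesB_eq]
  dsimp only
  set t := padSpacesA 3 text.toList with ht
  obtain ⟨m, hm⟩ : ∃ m, t.length = 3 * m :=
    ⟨t.length / 3, by have h2 := padSpacesA_mod text.toList; rw [← ht] at h2; omega⟩
  rw [PySem.List.foldl_append_singleton_eq_map, List.nil_append]
  have h0 := slice?_stride3 t 0
  have h1 := slice?_stride3 t 1
  have h2 := slice?_stride3 t 2
  simp only [Nat.cast_zero, Nat.cast_one, Nat.cast_ofNat] at h0 h1 h2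
  rw [h0, h1, h2]
  simp only [Option.getD_some, List.drop_zero]
  rw [core m t hm]
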